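-- pv_equiv track=rewrite | github.com/TrinityChristiana/py-exercises | number-loop/py-files/number_loop.py | recursion_sum
-- ===== SOURCE A (Python) =====
-- def recursion_sum(num_list, sum = 0, i = 0):
--     '''
--     Sums Numbers using Recursion Loop
--
--     num_list - list of numbers
--
--     Returns: Int
--     '''
--     number = sum
--     if type(num_list) == list:
--         if len(num_list) == i:
--             return sum
--         else:
--             sum += num_list[i]
--             i += 1
--
--             # In recursive funtions you must return function call!!!
--             return recursion_sum(num_list, sum, i)
-- ===== SOURCE B (Python) =====
-- def recursion_sum(num_list, sum = 0, i = 0):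
--     '''
--     Sums Numbers using an index loop over range(i, len(num_list))
--
--     num_list - list of numbers
--
--     Returns: Int
--     '''
--     if type(num_list) == list:
--         for j in range(i, len(num_list)):
--             sum += num_list[j]
--         return sum
-- ===== Notes on version B (the rewrite author's own statement) =====
-- stated objective: idiomatic
-- what changed: Replaces A's accumulator recursion with a single for-loop over range(i, len(num_list)), removing the recursive call (and Python's recursion-depth limit) while keeping the type guard and start parameters.
import Mathlib
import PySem

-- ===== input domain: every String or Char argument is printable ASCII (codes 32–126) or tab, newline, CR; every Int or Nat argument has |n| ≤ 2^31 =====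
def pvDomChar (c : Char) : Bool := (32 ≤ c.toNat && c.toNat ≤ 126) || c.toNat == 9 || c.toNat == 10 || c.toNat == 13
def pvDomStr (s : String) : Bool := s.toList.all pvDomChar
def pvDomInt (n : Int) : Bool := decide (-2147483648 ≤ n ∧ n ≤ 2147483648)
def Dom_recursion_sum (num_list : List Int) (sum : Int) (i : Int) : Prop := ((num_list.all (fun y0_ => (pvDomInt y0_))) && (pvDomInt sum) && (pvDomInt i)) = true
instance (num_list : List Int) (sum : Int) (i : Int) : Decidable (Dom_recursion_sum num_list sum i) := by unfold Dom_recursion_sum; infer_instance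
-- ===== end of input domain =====

-- B replaces A's accumulator recursion with a for-loop over range(i, len(num_list)) (same values, no recursion).

-- ===== PORT A =====
-- Literal port of A's recursion; Python's num_list[i] is pyGet? (negative index from
-- the end, none = IndexError, excluded by Pre_; the none branch's value 0 is unreachable
-- under Pre_). Termination: a some-result means -len ≤ i < len, so len - i shrinks.
def recursion_sum (num_list : List Int) (sum : Int) (i : Int) : Int :=
  if (num_list.length : Int) = i then sum
  else
    match h : PySem.List.pyGet? num_list i with
    | some v => recursion_sum num_list (sum + v) (i + 1)
    | none => 0   -- IndexError in Python; outside Pre_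
termination_by ((num_list.length : Int) - i).toNat
decreasing_by
  have hin : PySem.Raise.InRange num_list.length i := by
    by_contra hc
    rw [(PySem.List.pyGet?_eq_none_iff _ _).2 hc] at h
    simp at h
  unfold PySem.Raise.InRange at hin
  omega

-- ===== PORT B =====
-- Literal port of B: fold over range(i, len(num_list)); num_list[j] as pyGetD
-- (default 0 unreachable under Pre_, where every visited index is in range).
def recursion_sum_alt (num_list : List Int) (sum : Int) (i : Int) : Int :=
  (PySem.List.pyRange i (num_list.length : Int) 1).foldl
    (fun s j => s + PySem.List.pyGetD num_list j 0) sum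

-- ===== PRECONDITION & SPEC =====
-- Pre_ excludes exactly the inputs where A raises IndexError: i past the end, or below -len.
def Pre_recursion_sum (num_list : List Int) (sum : Int) (i : Int) : Prop :=
  -(num_list.length : Int) ≤ i ∧ i ≤ (num_list.length : Int)
instance (num_list : List Int) (sum : Int) (i : Int) : Decidable (Pre_recursion_sum num_list sum i) := by unfold Pre_recursion_sum; infer_instance

def pvWitness_recursion_sum : List Int × Int × Int := ([3, -1, 4], 10, -2)

def Spec_recursion_sum (num_list : List Int) (sum : Int) (i : Int) (out : Int) : Prop := out = recursion_sum_alt num_list sum i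
instance (num_list : List Int) (sum : Int) (i : Int) (out : Int) : Decidable (Spec_recursion_sum num_list sum i out) := by unfold Spec_recursion_sum; infer_instance

-- ===== CLAIM (what is proved, stated in full; the proofs are below) =====
def Claim_equal_recursion_sum : Prop := ∀ (num_list : List Int) (sum : Int) (i : Int), Dom_recursion_sum num_list sum i → Pre_recursion_sum num_list sum i → Spec_recursion_sum num_list sum i (recursion_sum num_list sum i)


-- ===== LEMMAS AND PROOFS =====

-- Under the in-range precondition, A's some-branch value is B's pyGetD value.
theorem pyGet?_eq_some_pyGetD (xs : List Int) (i : Int)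
    (hlo : -(xs.length : Int) ≤ i) (hhi : i < (xs.length : Int)) :
    PySem.List.pyGet? xs i = some (PySem.List.pyGetD xs i 0) := by
  have hin : PySem.Raise.InRange xs.length i := by
    unfold PySem.Raise.InRange; omega
  cases h : PySem.List.pyGet? xs i with
  | none => exact absurd ((PySem.List.pyGet?_eq_none_iff _ _).1 h) (not_not_intro hin)
  | some v =>
    unfold PySem.List.pyGetD
    rw [h]
    rfl

theorem recursion_sum_eq_alt (n : Nat) (num_list : List Int) (sum i : Int)
    (hn : ((num_list.length : Int) - i).toNat = n)
    (hlo : -(num_list.length : Int) ≤ i) (hhi : i ≤ (num_list.length : Int)) :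
    recursion_sum num_list sum i = recursion_sum_alt num_list sum i := by
  induction n generalizing sum i with
  | zero =>
    have heq : (num_list.length : Int) = i := by omega
    rw [recursion_sum, if_pos heq]
    unfold recursion_sum_alt
    rw [heq, PySem.List.pyRange_one_eq_nil (le_refl i)]
    rfl
  | succ m ih =>
    have hlt : i < (num_list.length : Int) := by omega
    have hne : ¬ ((num_list.length : Int) = i) := by omega
    have step : recursion_sum num_list sum i
        = recursion_sum num_list (sum + PySem.List.pyGetD num_list i 0) (i + 1) := by
      rw [recursion_sum, if_neg hne, pyGet?_eq_some_pyGetD num_list i hlo hlt]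
    rw [step, ih (sum + PySem.List.pyGetD num_list i 0) (i + 1) (by omega) (by omega) (by omega)]
    unfold recursion_sum_alt
    rw [PySem.List.pyRange_one_cons hlt]
    rfl

-- ===== VERDICT (by name: the statement is the Claim_ definition above) =====
theorem recursion_sum_spec : Claim_equal_recursion_sum := by
  intro num_list sum i _ hpre
  unfold Spec_recursion_sum
  exact recursion_sum_eq_alt ((num_list.length : Int) - i).toNat num_list sum i rfl hpre.1 hpre.2
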